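-- pv_equiv track=rewrite | github.com/cforrest96/CP1404Practicals | prac_03/word_generator.py | is_valid_format
-- ===== SOURCE A (Python) =====
-- def is_valid_format(word_format):
--
--     total = 0
--     for char in word_format:
--         if char == "c":
--             total += 1
--         elif char == "v":
--             total += 1
--     if total == len(word_format):
--         return True
--     else:
--         return False
-- ===== SOURCE B (Python) =====
-- def is_valid_format(word_format):
--     return set(word_format) <= {"c", "v"}
-- ===== Notes on version B (the rewrite author's own statement) =====
-- stated objective: simpler
-- what changed: Replaces A's per-character counter compared against the string length with a single subset test of the string's distinct-character set against the allowed two-letter alphabet.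
import Mathlib
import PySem

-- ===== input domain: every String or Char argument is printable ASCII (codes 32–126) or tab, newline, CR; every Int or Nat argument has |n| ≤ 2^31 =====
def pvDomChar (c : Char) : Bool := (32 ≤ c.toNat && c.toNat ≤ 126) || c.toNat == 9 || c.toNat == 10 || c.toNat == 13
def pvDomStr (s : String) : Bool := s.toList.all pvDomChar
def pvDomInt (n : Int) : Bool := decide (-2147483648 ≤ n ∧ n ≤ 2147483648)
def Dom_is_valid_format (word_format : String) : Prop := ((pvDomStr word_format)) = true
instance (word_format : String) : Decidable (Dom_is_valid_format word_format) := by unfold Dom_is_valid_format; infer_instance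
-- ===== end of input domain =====

-- ===== PORT A =====
-- B replaces A's character counter with a subset test of the distinct-character set; objective: simpler.
def is_valid_format (word_format : String) : Bool :=
  let total := word_format.toList.foldl
    (fun t c => if c = 'c' then t + 1 else if c = 'v' then t + 1 else t) (0 : Int)
  if total = (word_format.toList.length : Int) then true else false

-- ===== PORT B =====
def is_valid_format_alt (word_format : String) : Bool :=
  PySem.Set.issubset (PySem.Set.ofList word_format.toList) ['c', 'v']

-- ===== PRECONDITION & SPEC =====
def Spec_is_valid_format (word_format : String) (out : Bool) : Prop := out = is_valid_format_alt word_format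
instance (word_format : String) (out : Bool) : Decidable (Spec_is_valid_format word_format out) := by unfold Spec_is_valid_format; infer_instance

-- ===== CLAIM (what is proved, stated in full; the proofs are below) =====
def Claim_equal_is_valid_format : Prop := ∀ (word_format : String), Dom_is_valid_format word_format → Spec_is_valid_format word_format (is_valid_format word_format)

-- ===== LEMMAS AND PROOFS =====

-- ===== VERDICT (by name: the statement is the Claim_ definition above) =====
-- A's counter totals exactly the 'c'/'v' characters, so it equals the length iff every char is 'c' or 'v'.
theorem count_le_length (l : List Char) (acc : Int) :
    l.foldl (fun t c => if c = 'c' then t + 1 else if c = 'v' then t + 1 else t) acc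
      = acc + (l.countP (fun c => c = 'c' ∨ c = 'v')) := by
  induction l generalizing acc with
  | nil => simp
  | cons x xs ih =>
    simp only [List.foldl_cons, List.countP_cons, ih]
    by_cases h1 : x = 'c' <;> by_cases h2 : x = 'v' <;> simp [h1, h2] <;> omega

theorem is_valid_format_spec : Claim_equal_is_valid_format := by
  intro w _
  unfold Spec_is_valid_format is_valid_format is_valid_format_alt
  rw [count_le_length]
  have hiff := PySem.Set.issubset_iff (PySem.Set.ofList w.toList) ['c', 'v']
  have hcount : w.toList.countP (fun c => decide (c = 'c' ∨ c = 'v')) = w.toList.length ↔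
      ∀ x ∈ w.toList, x ∈ ['c', 'v'] := by
    rw [List.countP_eq_length]
    constructor
    · intro h x hx
      have := h x hx
      simp at this
      rcases this with h' | h' <;> simp [h']
    · intro h x hx
      have := h x hx
      simp at this
      rcases this with h' | h' <;> simp [h']
  rcases h : PySem.Set.issubset (PySem.Set.ofList w.toList) ['c', 'v'] with _ | _
  · rw [h] at hiff
    have hne : ¬ ∀ x ∈ w.toList, x ∈ ['c', 'v'] := by simp at hiff; simpa using hiff
    rw [if_neg]
    intro hc
    exact hne (hcount.mp (by omega))
  · rw [h] at hiff
    have hall : ∀ x ∈ w.toList, x ∈ ['c', 'v'] := by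
      intro x hx
      exact hiff.mp rfl x ((PySem.Set.mem_ofList w.toList x).mpr hx)
    have := hcount.mpr (by
      intro x hx
      exact hall x hx)
    rw [if_pos (by omega)]
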